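-- pv_equiv track=rewrite | github.com/hsinmosyi/TWBias | src/cal_bias_chbias.py | replace_target_words
-- ===== SOURCE A (Python) =====
-- from itertools import product, groupby
--
-- def replace_target_words(sentence, target_dict):
--     replaced_sentences = []
--
--     # Identify all keywords in the sentence and their corresponding replacements
--     applicable_replacements = [(key, value) for key, values in target_dict.items() for value in values if key in sentence]
--
--     # Group replacements by keywords
--     grouped_replacements = [list(g) for _, g in groupby(applicable_replacements, key=lambda x: x[0])]
--
--     # Generate all possible replacement combinations for the sentence
--     for replacement_combo in product(*[values for values in grouped_replacements]):
--         temp_sentence = sentence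
--         for key, replacement in replacement_combo:
--             temp_sentence = temp_sentence.replace(key, replacement)
--         replaced_sentences.append(temp_sentence)
--     return replaced_sentences
-- ===== SOURCE B (Python) =====
-- def replace_target_words(sentence, target_dict):
--     # Recursive expansion over the applicable keys (last key varies fastest),
--     # instead of flatten + groupby + itertools.product.
--     keys_in = [(k, vs) for k, vs in target_dict.items() if k in sentence and vs]
--
--     def rec(i, current):
--         if i == len(keys_in):
--             return [current]
--         key, values = keys_in[i]
--         out = []
--         for v in values:
--             out.extend(rec(i + 1, current.replace(key, v)))
--         return out
--
--     return rec(0, sentence)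
-- ===== Notes on version B (the rewrite author's own statement) =====
-- stated objective: simpler
-- what changed: Replaced the flatten + itertools.groupby + itertools.product pipeline with a single precomputed list of applicable (key, values) entries and a direct recursion that expands replacement choices, the last key varying fastest.
import Mathlib
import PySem

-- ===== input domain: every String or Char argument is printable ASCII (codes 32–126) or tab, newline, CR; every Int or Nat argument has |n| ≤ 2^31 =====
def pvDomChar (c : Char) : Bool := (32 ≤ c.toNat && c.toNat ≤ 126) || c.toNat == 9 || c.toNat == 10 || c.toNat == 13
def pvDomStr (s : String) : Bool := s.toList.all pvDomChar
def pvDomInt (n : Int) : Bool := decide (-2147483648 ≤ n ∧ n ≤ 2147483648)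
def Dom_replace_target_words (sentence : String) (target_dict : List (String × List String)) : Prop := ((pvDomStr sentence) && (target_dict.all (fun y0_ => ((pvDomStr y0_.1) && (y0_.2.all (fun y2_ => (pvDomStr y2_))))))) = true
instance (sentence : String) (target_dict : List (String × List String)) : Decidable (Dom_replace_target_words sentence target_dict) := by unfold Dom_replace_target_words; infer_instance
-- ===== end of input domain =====

-- B replaces A's flatten + groupby + itertools.product pipeline by a direct recursion
-- over the applicable (key, values) entries (objective: simpler); same return value everywhere.

-- ===== PORT A =====
-- itertools.groupby(l, key = fst), restricted to what A uses: the groups as lists.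
def pvGroupby : List (String × String) → List (List (String × String))
  | [] => []
  | x :: xs =>
      (x :: xs.takeWhile (fun y => y.1 == x.1)) :: pvGroupby (xs.dropWhile (fun y => y.1 == x.1))
termination_by l => l.length
decreasing_by
  simp only [List.length_cons]
  exact Nat.lt_succ_of_le (List.length_dropWhile_le _ _)


-- itertools.product(*groups): the last list varies fastest.
def pvProduct (ls : List (List (String × String))) : List (List (String × String)) :=
  ls.foldr (fun xs acc => xs.flatMap (fun x => acc.map (x :: ·))) [[]]

def replace_target_words (sentence : String) (target_dict : List (String × List String)) : List String :=
  let items := (PySem.Dict.ofList target_dict).items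
  let applicable_replacements :=
    items.flatMap (fun p =>
      p.2.flatMap (fun v => if PySem.Str.isIn p.1 sentence then [(p.1, v)] else []))
  let grouped_replacements := pvGroupby applicable_replacements
  (pvProduct grouped_replacements).map (fun combo =>
    combo.foldl (fun t kv => PySem.Str.replace t kv.1 kv.2) sentence)

-- ===== PORT B =====
def altRec (s : String) : List (String × List String) → String → List String
  | [], cur => [cur]
  | (k, vs) :: rest, cur => vs.flatMap (fun v => altRec s rest (PySem.Str.replace cur k v))

def replace_target_words_alt (sentence : String) (target_dict : List (String × List String)) : List String :=
  let keys_in := (PySem.Dict.ofList target_dict).items.filter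
    (fun p => PySem.Str.isIn p.1 sentence && !p.2.isEmpty)
  altRec sentence keys_in sentence

-- ===== PRECONDITION & SPEC =====
def Spec_replace_target_words (sentence : String) (target_dict : List (String × List String)) (out : List String) : Prop := out = replace_target_words_alt sentence target_dict
instance (sentence : String) (target_dict : List (String × List String)) (out : List String) : Decidable (Spec_replace_target_words sentence target_dict out) := by unfold Spec_replace_target_words; infer_instance

-- ===== CLAIM (what is proved, stated in full; the proofs are below) =====
def Claim_equal_replace_target_words : Prop := ∀ (sentence : String) (target_dict : List (String × List String)), Dom_replace_target_words sentence target_dict → Spec_replace_target_words sentence target_dict (replace_target_words sentence target_dict)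

-- ===== LEMMAS AND PROOFS =====
theorem pvGroupby_nil : pvGroupby [] = [] := by rw [pvGroupby.eq_def]

theorem pvGroupby_cons (x : String × String) (xs : List (String × String)) :
    pvGroupby (x :: xs)
      = (x :: xs.takeWhile (fun y => y.1 == x.1)) :: pvGroupby (xs.dropWhile (fun y => y.1 == x.1)) := by
  rw [pvGroupby.eq_def]

theorem pvGroupby_const_append (k : String) (v : String) (vt : List String)
    (ys : List (String × String)) (h : ∀ p ∈ ys, p.1 ≠ k) :
    pvGroupby (((v :: vt).map (fun w => (k, w))) ++ ys)
      = ((v :: vt).map (fun w => (k, w))) :: pvGroupby ys := by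
  have htw : ∀ vt : List String, (vt.map (fun w => (k, w)) ++ ys).takeWhile (fun y => y.1 == k)
      = vt.map (fun w => (k, w)) ∧ (vt.map (fun w => (k, w)) ++ ys).dropWhile (fun y => y.1 == k) = ys := by
    intro vt
    induction vt with
    | nil =>
        cases ys with
        | nil => simp
        | cons y yt =>
            have hy : (y.1 == k) = false := by simpa using h y List.mem_cons_self
            simp [hy]
    | cons a t iht => simpa using iht
  rw [List.map_cons, List.cons_append, pvGroupby_cons]
  simp only [(htw vt).1, (htw vt).2]


-- A's applicable-replacements list, as a function of the items list (definitionally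
-- the let-bound list inside replace_target_words)
def pvAppl (s : String) (l : List (String × List String)) : List (String × String) :=
  l.flatMap (fun p => p.2.flatMap (fun v => if PySem.Str.isIn p.1 s then [(p.1, v)] else []))

theorem pvAppl_keys (s : String) (l : List (String × List String)) (p : String × String)
    (hp : p ∈ pvAppl s l) : p.1 ∈ l.map Prod.fst := by
  simp only [pvAppl, List.mem_flatMap] at hp
  obtain ⟨q, hq, v, hv, hin⟩ := hp
  split at hin
  · simp only [List.mem_singleton] at hin
    subst hin
    exact List.mem_map.mpr ⟨q, hq, rfl⟩
  · simp at hin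

theorem pvCore (s : String) (l : List (String × List String))
    (hnd : (l.map Prod.fst).Nodup) (cur : String) :
    (pvProduct (pvGroupby (pvAppl s l))).map
        (fun combo => combo.foldl (fun t kv => PySem.Str.replace t kv.1 kv.2) cur)
      = altRec s (l.filter (fun p => PySem.Str.isIn p.1 s && !p.2.isEmpty)) cur := by
  induction l generalizing cur with
  | nil =>
      simp [pvAppl, pvGroupby_nil, pvProduct, altRec]
  | cons hd tl ih =>
      obtain ⟨k, vs⟩ := hd
      simp only [List.map_cons, List.nodup_cons] at hnd
      obtain ⟨hk, hnd'⟩ := hnd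
      by_cases hin : PySem.Chars.isIn k.toList s.toList = true
      · have hinS : PySem.Str.isIn k s = true := by simp [hin]
        cases vs with
        | nil =>
            have happl : pvAppl s ((k, []) :: tl) = pvAppl s tl := by
              simp [pvAppl]
            have hfc : ((k, ([] : List String)) :: tl).filter
                (fun p => PySem.Str.isIn p.1 s && !p.2.isEmpty)
                = tl.filter (fun p => PySem.Str.isIn p.1 s && !p.2.isEmpty) := by
              simp
            rw [happl, hfc]
            exact ih hnd' cur
        | cons v vt =>
            have happl : pvAppl s ((k, v :: vt) :: tl)
                = ((v :: vt).map (fun w => (k, w))) ++ pvAppl s tl := by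
              simp [pvAppl, List.flatMap_cons, hin, ← List.map_eq_flatMap]
            have hfc : ((k, v :: vt) :: tl).filter
                (fun p => PySem.Str.isIn p.1 s && !p.2.isEmpty)
                = (k, v :: vt) :: tl.filter (fun p => PySem.Str.isIn p.1 s && !p.2.isEmpty) := by
              simp [hin]
            have hkeys : ∀ p ∈ pvAppl s tl, p.1 ≠ k := fun p hp heq =>
              hk (heq ▸ pvAppl_keys s tl p hp)
            rw [happl, pvGroupby_const_append k v vt _ hkeys, hfc]
            show ((((v :: vt).map (fun w => (k, w))).flatMap
                (fun x => (pvProduct (pvGroupby (pvAppl s tl))).map (x :: ·))).map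
                (fun combo => combo.foldl (fun t kv => PySem.Str.replace t kv.1 kv.2) cur))
              = ((v :: vt).flatMap fun w =>
                  altRec s (tl.filter (fun p => PySem.Str.isIn p.1 s && !p.2.isEmpty))
                    (PySem.Str.replace cur k w))
            rw [List.flatMap_map, List.map_flatMap]
            refine List.flatMap_congr (fun w _ => ?_)
            rw [List.map_map]
            exact ih hnd' (PySem.Str.replace cur k w)
      · have hinF : PySem.Chars.isIn k.toList s.toList = false := by
          cases h : PySem.Chars.isIn k.toList s.toList with
          | true => exact absurd h hin
          | false => rfl
        have happl : pvAppl s ((k, vs) :: tl) = pvAppl s tl := by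
          simp [pvAppl, hinF]
        have hfc : ((k, vs) :: tl).filter (fun p => PySem.Str.isIn p.1 s && !p.2.isEmpty)
            = tl.filter (fun p => PySem.Str.isIn p.1 s && !p.2.isEmpty) := by
          simp [hinF]
        rw [happl, hfc]
        exact ih hnd' cur

-- ===== VERDICT (by name: the statement is the Claim_ definition above) =====
theorem replace_target_words_spec : Claim_equal_replace_target_words := by
  intro sentence target_dict _
  unfold Spec_replace_target_words replace_target_words replace_target_words_alt
  exact pvCore sentence (PySem.Dict.ofList target_dict).items
    (PySem.Dict.nodup_keys_ofList target_dict) sentence
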